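-- pv_equiv track=rewrite | github.com/Rudreshcg/CAS_POC | projects/scm-static/app.py | is_business_email
-- ===== SOURCE A (Python) =====
-- def is_business_email(email):
--     """
--     Validate if the email is a business email (not from free email providers)
--     Returns (is_valid, message)
--     """
--     domain = email.lower().split('@')[-1]
--
--     FREE_EMAIL_DOMAINS = {
--     'gmail.com',
--     'yahoo.com',
--     'hotmail.com',
--     'outlook.com',
--     'aol.com',
--     'icloud.com',
--     'protonmail.com',
--     'zoho.com',
--     'mail.com',
--     'yandex.com',
--     'gmx.com',
--     'live.com',
--     'msn.com',
--     'yahoo.co.uk',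
--     'yahoo.co.in',
--     'yahoo.co.jp',
--     'me.com',
--     'mac.com'
-- }
--
--     # Check if domain is in the blocked list
--     if domain in FREE_EMAIL_DOMAINS:
--         return False, "Please use your business email address."
--
--     # Additional check for subdomains of free email providers
--     for free_domain in FREE_EMAIL_DOMAINS:
--         if domain.endswith(f'.{free_domain}'):
--             return False, "Please use your business email address."
--
--     return True, "Valid business email"
-- ===== SOURCE B (Python) =====
-- def _after_first_dot(s):
--     """Return the part of s after its first '.', or None if there is no dot."""
--     for i, ch in enumerate(s):
--         if ch == '.':
--             return s[i + 1:]
--     return None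
--
--
-- def is_business_email(email):
--     # business-email check: (is_valid, message)
--     domain = email.lower().split('@')[-1]
--
--     FREE_EMAIL_DOMAINS = {
--         'gmail.com',
--         'yahoo.com',
--         'hotmail.com',
--         'outlook.com',
--         'aol.com',
--         'icloud.com',
--         'protonmail.com',
--         'zoho.com',
--         'mail.com',
--         'yandex.com',
--         'gmx.com',
--         'live.com',
--         'msn.com',
--         'yahoo.co.uk',
--         'yahoo.co.in',
--         'yahoo.co.jp',
--         'me.com',
--         'mac.com',
--     }
--
--     # Walk the domain's own dot-delimited suffixes (domain, then after each '.')
--     # and test each one against the set, instead of scanning the whole set with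
--     # endswith for every entry.
--     suffix = domain
--     while suffix is not None:
--         if suffix in FREE_EMAIL_DOMAINS:
--             return False, "Please use your business email address."
--         suffix = _after_first_dot(suffix)
--     return True, "Valid business email"
-- ===== Notes on version B (the rewrite author's own statement) =====
-- stated objective: alternative
-- what changed: Instead of A's exact-match test plus an endswith scan over the fixed 18-entry free-provider set, B walks the domain's own dot-delimited suffixes (the domain, then the tail after each '.') and tests each one for set membership.
import Mathlib
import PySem

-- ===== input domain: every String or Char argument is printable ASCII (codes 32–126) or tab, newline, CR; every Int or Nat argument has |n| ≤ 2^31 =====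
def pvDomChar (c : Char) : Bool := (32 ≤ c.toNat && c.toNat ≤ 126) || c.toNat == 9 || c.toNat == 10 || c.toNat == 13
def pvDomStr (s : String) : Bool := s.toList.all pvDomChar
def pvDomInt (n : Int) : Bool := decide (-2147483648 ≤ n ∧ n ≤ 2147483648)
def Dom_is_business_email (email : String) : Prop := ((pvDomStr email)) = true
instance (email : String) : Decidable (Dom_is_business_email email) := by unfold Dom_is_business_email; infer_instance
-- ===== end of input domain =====

-- ===== PORT A =====
-- B replaces A's exact-match + endswith scan over the fixed provider set by peeling the
-- domain's own dot-suffixes and testing each for set membership (objective: alternative).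

-- the set literal of A, in source order
def freeDomainsA : List String :=
  ["gmail.com", "yahoo.com", "hotmail.com", "outlook.com", "aol.com", "icloud.com",
   "protonmail.com", "zoho.com", "mail.com", "yandex.com", "gmx.com", "live.com",
   "msn.com", "yahoo.co.uk", "yahoo.co.in", "yahoo.co.jp", "me.com", "mac.com"]

-- the 'for free_domain in FREE_EMAIL_DOMAINS: if domain.endswith(f'.{free_domain}') …' loop
def aEndsLoop : List String → String → Bool × String
  | [], _ => (true, "Valid business email")
  | fd :: rest, domain =>
    if PySem.Str.endswith domain ("." ++ fd) then
      (false, "Please use your business email address.")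
    else aEndsLoop rest domain

def is_business_email (email : String) : Bool × String :=
  -- email.lower().split('@')[-1]; '@' ≠ '' so split? is always some
  let domain := PySem.List.pyGetD ((PySem.Str.split? (PySem.Str.lower email) "@").getD []) (-1) ""
  if freeDomainsA.contains domain then
    (false, "Please use your business email address.")
  else
    aEndsLoop freeDomainsA domain

-- ===== PORT B =====
-- the same set literal; B works on the domains' character lists
def freeDomainsB : List (List Char) :=
  (["gmail.com", "yahoo.com", "hotmail.com", "outlook.com", "aol.com", "icloud.com",
    "protonmail.com", "zoho.com", "mail.com", "yandex.com", "gmx.com", "live.com",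
    "msn.com", "yahoo.co.uk", "yahoo.co.in", "yahoo.co.jp", "me.com", "mac.com"] : List String).map
    String.toList

-- _after_first_dot: the part after the first '.', or none if there is no dot
def afterFirstDot : List Char → Option (List Char)
  | [] => none
  | c :: cs => if c = '.' then some cs else afterFirstDot cs

theorem afterFirstDot_length : ∀ (cs u : List Char), afterFirstDot cs = some u → u.length < cs.length := by
  intro cs
  induction cs with
  | nil => intro u h; simp [afterFirstDot] at h
  | cons c cs ih =>
    intro u h
    simp only [afterFirstDot] at h
    split at h
    · cases h; simp
    · have := ih u h; simp; omega

-- the 'while suffix is not None' loop of B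
def bPeel (s : List Char) : Bool × String :=
  if freeDomainsB.contains s then
    (false, "Please use your business email address.")
  else
    match h : afterFirstDot s with
    | none => (true, "Valid business email")
    | some t => bPeel t
termination_by s.length
decreasing_by exact afterFirstDot_length s t h

def is_business_email_alt (email : String) : Bool × String :=
  -- email.lower().split('@')[-1]; '@' ≠ '' so split? is always some
  let domain := PySem.List.pyGetD ((PySem.Str.split? (PySem.Str.lower email) "@").getD []) (-1) ""
  bPeel domain.toList

-- ===== PRECONDITION & SPEC =====
def Spec_is_business_email (email : String) (out : Bool × String) : Prop := out = is_business_email_alt email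
instance (email : String) (out : Bool × String) : Decidable (Spec_is_business_email email out) := by unfold Spec_is_business_email; infer_instance

-- ===== CLAIM (what is proved, stated in full; the proofs are below) =====
def Claim_equal_is_business_email : Prop := ∀ (email : String), Dom_is_business_email email → Spec_is_business_email email (is_business_email email)

-- ===== LEMMAS AND PROOFS =====

-- the common proposition both loops decide: some dot-delimited suffix of cs
-- (cs itself, or the tail after some '.') is a free domain
def FreeSuffix (cs : List Char) : Prop :=
  cs ∈ freeDomainsB ∨ ∃ t, ('.' :: t) <:+ cs ∧ t ∈ freeDomainsB

theorem memB_iff (t : List Char) : t ∈ freeDomainsB ↔ ∃ f ∈ freeDomainsA, f.toList = t := by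
  rw [show freeDomainsB = freeDomainsA.map String.toList from rfl]
  exact List.mem_map

theorem memA_iff (d : String) : d ∈ freeDomainsA ↔ d.toList ∈ freeDomainsB := by
  rw [memB_iff]
  constructor
  · intro h; exact ⟨d, h, rfl⟩
  · rintro ⟨f, hf, he⟩; rwa [← String.toList_inj.mp he]

theorem afterFirstDot_none (cs : List Char) (h : afterFirstDot cs = none) :
    ∀ t, ¬ ('.' :: t) <:+ cs := by
  induction cs with
  | nil => intro t ht; simpa using ht.length_le
  | cons c cs ih =>
    simp only [afterFirstDot] at h
    split at h
    · exact absurd h (by simp)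
    · intro t ht
      rcases List.suffix_cons_iff.mp ht with he | hs
      · injection he with h1 _; exact ‹¬ c = '.'› h1.symm
      · exact ih h t hs

theorem afterFirstDot_some (cs u : List Char) (h : afterFirstDot cs = some u) :
    ∀ t, (('.' :: t) <:+ cs ↔ (t = u ∨ ('.' :: t) <:+ u)) := by
  induction cs generalizing u with
  | nil => simp [afterFirstDot] at h
  | cons c cs ih =>
    simp only [afterFirstDot] at h
    split at h
    · subst ‹c = '.'›
      cases h
      intro t
      rw [List.suffix_cons_iff]
      constructor
      · rintro (he | hs)
        · injection he with _ h2; exact Or.inl h2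
        · exact Or.inr hs
      · rintro (rfl | hs)
        · exact Or.inl rfl
        · exact Or.inr hs
    · intro t
      rw [List.suffix_cons_iff]
      constructor
      · rintro (he | hs)
        · injection he with h1 _; exact absurd h1.symm ‹¬ c = '.'›
        · exact (ih u h t).mp hs
      · intro hr
        exact Or.inr ((ih u h t).mpr hr)

theorem bPeel_fail (cs : List Char) (h : FreeSuffix cs) :
    bPeel cs = (false, "Please use your business email address.") := by
  induction cs using bPeel.induct with
  | case1 cs hmem => rw [bPeel, if_pos hmem]
  | case2 cs hmem hnone =>
    rcases h with hin | ⟨t, hs, _⟩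
    · exact absurd (List.contains_iff_mem.mpr hin) hmem
    · exact absurd hs (afterFirstDot_none cs hnone t)
  | case3 cs hmem u hsome ih =>
    rw [bPeel, if_neg hmem]
    split
    · simp_all
    · rename_i t heq
      have hut : u = t := by rw [hsome] at heq; injection heq
      subst hut
      apply ih
      rcases h with hin | ⟨t', hs, htB⟩
      · exact absurd (List.contains_iff_mem.mpr hin) hmem
      · rcases (afterFirstDot_some cs u hsome t').mp hs with rfl | hs'
        · exact Or.inl htB
        · exact Or.inr ⟨t', hs', htB⟩

theorem bPeel_ok (cs : List Char) (h : ¬ FreeSuffix cs) :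
    bPeel cs = (true, "Valid business email") := by
  induction cs using bPeel.induct with
  | case1 cs hmem => exact absurd (Or.inl (List.contains_iff_mem.mp hmem)) h
  | case2 cs hmem hnone =>
    rw [bPeel, if_neg hmem]
    split
    · rfl
    · simp_all
  | case3 cs hmem u hsome ih =>
    rw [bPeel, if_neg hmem]
    split
    · simp_all
    · rename_i t heq
      have hut : u = t := by rw [hsome] at heq; injection heq
      subst hut
      apply ih
      rintro (hin | ⟨t', hs', htB⟩)
      · exact h (Or.inr ⟨u, (afterFirstDot_some cs u hsome u).mpr (Or.inl rfl), hin⟩)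
      · exact h (Or.inr ⟨t', (afterFirstDot_some cs u hsome t').mpr (Or.inr hs'), htB⟩)

theorem aEndsLoop_eq (fds : List String) (d : String) :
    aEndsLoop fds d =
      if ∃ fd ∈ fds, ('.' :: fd.toList) <:+ d.toList
      then (false, "Please use your business email address.")
      else (true, "Valid business email") := by
  induction fds with
  | nil => simp [aEndsLoop]
  | cons fd rest ih =>
    simp only [aEndsLoop]
    by_cases hend : PySem.Str.endswith d ("." ++ fd) = true
    · rw [if_pos hend, if_pos]
      refine ⟨fd, by simp, ?_⟩
      have := (PySem.Chars.endswith_iff _ _).mp (by simpa using hend)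
      simpa using this
    · rw [if_neg hend, ih]
      by_cases hex : ∃ f ∈ rest, ('.' :: f.toList) <:+ d.toList
      · rcases hex with ⟨f, hf, hs⟩
        rw [if_pos ⟨f, hf, hs⟩, if_pos ⟨f, by simp [hf], hs⟩]
      · rw [if_neg hex, if_neg]
        rintro ⟨f, hf, hs⟩
        rcases List.mem_cons.mp hf with rfl | hf'
        · apply hend
          rw [show PySem.Str.endswith d ("." ++ f) = PySem.Chars.endswith d.toList ("." ++ f).toList from by simp]
          exact (PySem.Chars.endswith_iff _ _).mpr (by simpa using hs)
        · exact hex ⟨f, hf', hs⟩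

-- the two stages after computing the (identical) domain expression agree
theorem stage_eq (d : String) :
    (if freeDomainsA.contains d then (false, "Please use your business email address.")
     else aEndsLoop freeDomainsA d) = bPeel d.toList := by
  by_cases hF : FreeSuffix d.toList
  · rw [bPeel_fail d.toList hF]
    by_cases hc : freeDomainsA.contains d = true
    · rw [if_pos hc]
    · rw [if_neg hc, aEndsLoop_eq, if_pos]
      rcases hF with hin | ⟨t, hs, htB⟩
      · exact absurd (List.contains_iff_mem.mpr ((memA_iff d).mpr hin)) hc
      · rcases (memB_iff t).mp htB with ⟨f, hf, rfl⟩
        exact ⟨f, hf, hs⟩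
  · rw [bPeel_ok d.toList hF]
    have hc : ¬ freeDomainsA.contains d = true := fun hc =>
      hF (Or.inl ((memA_iff d).mp (List.contains_iff_mem.mp hc)))
    rw [if_neg hc, aEndsLoop_eq, if_neg]
    rintro ⟨f, hf, hs⟩
    exact hF (Or.inr ⟨f.toList, hs, (memB_iff f.toList).mpr ⟨f, hf, rfl⟩⟩)

-- ===== VERDICT (by name: the statement is the Claim_ definition above) =====
theorem is_business_email_spec : Claim_equal_is_business_email := by
  intro email _
  unfold Spec_is_business_email is_business_email is_business_email_alt
  exact stage_eq _
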